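-- pv_equiv track=rewrite | github.com/fullscreen-triangle/pakati | pakati/orchestration/reasoning.py | _regions_overlap
-- ===== SOURCE A (Python) =====
-- def _regions_overlap(region1, region2) -> bool:
--     """Check if two regions overlap."""
--     # This is a simplified check
--     # A more accurate implementation would check for polygon intersection
--
--     # Get bounding boxes
--     def get_bbox(region):
--         x_coords = [p[0] for p in region]
--         y_coords = [p[1] for p in region]
--         return (min(x_coords), min(y_coords), max(x_coords), max(y_coords))
--
--     bbox1 = get_bbox(region1)
--     bbox2 = get_bbox(region2)
--
--     # Check for overlap
--     if (bbox1[0] > bbox2[2] or bbox1[2] < bbox2[0] or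
--         bbox1[1] > bbox2[3] or bbox1[3] < bbox2[1]):
--         return False
--     return True
-- ===== SOURCE B (Python) =====
-- def _regions_overlap(region1, region2) -> bool:
--     """Check if two regions overlap via pairwise separation tests (no bounding boxes)."""
--     def separated(a, b, axis):
--         # every point of a lies strictly before every point of b on this axis
--         return all(p[axis] < q[axis] for p in a for q in b)
--     return not (separated(region1, region2, 0) or separated(region2, region1, 0) or
--                 separated(region1, region2, 1) or separated(region2, region1, 1))
-- ===== Notes on version B (the rewrite author's own statement) =====
-- stated objective: alternative
-- what changed: B never builds bounding boxes: it decides overlap by De Morgan from four pairwise separation quantifiers (all points of one region strictly before all points of the other on an axis), replacing A's min/max extreme computation with an all-pairs comparison test.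
import Mathlib
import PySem

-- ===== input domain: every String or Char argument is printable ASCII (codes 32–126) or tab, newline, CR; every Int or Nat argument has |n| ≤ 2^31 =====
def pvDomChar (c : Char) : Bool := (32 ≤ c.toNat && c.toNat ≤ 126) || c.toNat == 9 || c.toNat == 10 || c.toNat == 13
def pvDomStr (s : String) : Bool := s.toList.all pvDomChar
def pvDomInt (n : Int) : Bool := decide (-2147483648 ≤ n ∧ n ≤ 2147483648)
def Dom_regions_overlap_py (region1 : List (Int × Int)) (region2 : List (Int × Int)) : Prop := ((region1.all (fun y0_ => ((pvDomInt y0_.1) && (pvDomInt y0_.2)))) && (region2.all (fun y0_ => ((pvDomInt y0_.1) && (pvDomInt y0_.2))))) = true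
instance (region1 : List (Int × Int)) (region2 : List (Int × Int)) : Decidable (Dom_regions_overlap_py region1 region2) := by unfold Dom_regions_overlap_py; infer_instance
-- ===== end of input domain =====

-- B drops the bounding boxes entirely: it tests pairwise strict separation of the two point sets
-- on each axis (all p < q quantifiers) and negates the disjunction; objective: alternative
-- algorithm (O(n*m) pairwise test vs A's O(n+m) bbox computation).


-- ===== PORT A =====
-- get_bbox: two coordinate lists, then min/min/max/max; none = the ValueError of min([]) (excluded by Pre_)
def pyGetBbox (region : List (Int × Int)) : Option (Int × Int × Int × Int) :=
  let x_coords := region.map (fun p => p.1)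
  let y_coords := region.map (fun p => p.2)
  match PySem.List.min? x_coords (fun x => x), PySem.List.min? y_coords (fun x => x),
        PySem.List.max? x_coords (fun x => x), PySem.List.max? y_coords (fun x => x) with
  | some mnx, some mny, some mxx, some mxy => some (mnx, mny, mxx, mxy)
  | _, _, _, _ => none

def regions_overlap_py (region1 : List (Int × Int)) (region2 : List (Int × Int)) : Bool :=
  match pyGetBbox region1, pyGetBbox region2 with
  | some bbox1, some bbox2 =>
      if bbox1.1 > bbox2.2.2.1 || bbox1.2.2.1 < bbox2.1 ||
         bbox1.2.1 > bbox2.2.2.2 || bbox1.2.2.2 < bbox2.2.1 then false else true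
  | _, _ => false   -- A raises ValueError here; unreachable under Pre_

-- ===== PORT B =====
-- separated(a, b, axis): every point of a lies strictly before every point of b on this axis
def altSeparated (a b : List (Int × Int)) (axis : Int × Int → Int) : Bool :=
  a.all (fun p => b.all (fun q => decide (axis p < axis q)))

def regions_overlap_py_alt (region1 : List (Int × Int)) (region2 : List (Int × Int)) : Bool :=
  !(altSeparated region1 region2 (fun p => p.1) || altSeparated region2 region1 (fun p => p.1) ||
    altSeparated region1 region2 (fun p => p.2) || altSeparated region2 region1 (fun p => p.2))

-- ===== PRECONDITION & SPEC =====
-- Pre_ excludes exactly the inputs with an empty region, where A's min([]) raises ValueError (B returns False there).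
def Pre_regions_overlap_py (region1 : List (Int × Int)) (region2 : List (Int × Int)) : Prop :=
  region1 ≠ [] ∧ region2 ≠ []
instance (region1 : List (Int × Int)) (region2 : List (Int × Int)) : Decidable (Pre_regions_overlap_py region1 region2) := by unfold Pre_regions_overlap_py; infer_instance
def pvWitness_regions_overlap_py : (List (Int × Int)) × (List (Int × Int)) := ([(0, 0), (2, 3)], [(1, 1)])
def Spec_regions_overlap_py (region1 : List (Int × Int)) (region2 : List (Int × Int)) (out : Bool) : Prop := out = regions_overlap_py_alt region1 region2
instance (region1 : List (Int × Int)) (region2 : List (Int × Int)) (out : Bool) : Decidable (Spec_regions_overlap_py region1 region2 out) := by unfold Spec_regions_overlap_py; infer_instance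

-- ===== CLAIM (what is proved, stated in full; the proofs are below) =====
def Claim_equal_regions_overlap_py : Prop := ∀ (region1 : List (Int × Int)) (region2 : List (Int × Int)), Dom_regions_overlap_py region1 region2 → Pre_regions_overlap_py region1 region2 → Spec_regions_overlap_py region1 region2 (regions_overlap_py region1 region2)
-- ===== LEMMAS AND PROOFS =====
lemma foldl_max_lt (c : Int) (t : List Int) (h : Int) :
    t.foldl max h < c ↔ h < c ∧ ∀ x ∈ t, x < c := by
  induction t generalizing h with
  | nil => simp
  | cons x xs ih => simp [List.foldl_cons, ih]; tauto

lemma lt_foldl_min (c : Int) (t : List Int) (h : Int) :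
    c < t.foldl min h ↔ c < h ∧ ∀ x ∈ t, c < x := by
  induction t generalizing h with
  | nil => simp
  | cons x xs ih => simp [List.foldl_cons, ih]; tauto

-- separation of two nonempty point sets on an axis = running max of one < running min of the other
lemma altSeparated_eq (f : Int × Int → Int) (a0 b0 : Int × Int) (ta tb : List (Int × Int)) :
    altSeparated (a0 :: ta) (b0 :: tb) f =
      decide ((ta.map f).foldl max (f a0) < (tb.map f).foldl min (f b0)) := by
  rw [Bool.eq_iff_iff]
  simp only [altSeparated, List.all_eq_true, decide_eq_true_eq,
    foldl_max_lt, lt_foldl_min, List.mem_map, List.mem_cons]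
  constructor
  · intro H
    refine ⟨⟨H a0 (Or.inl rfl) b0 (Or.inl rfl), ?_⟩, ?_⟩
    · rintro x ⟨p, hp, rfl⟩; exact H p (Or.inr hp) b0 (Or.inl rfl)
    · rintro x ⟨q, hq, rfl⟩
      exact ⟨H a0 (Or.inl rfl) q (Or.inr hq),
             by rintro y ⟨p, hp, rfl⟩; exact H p (Or.inr hp) q (Or.inr hq)⟩
  · rintro ⟨⟨h00, hta⟩, htb⟩ p hp q hq
    rcases hp with rfl | hp <;> rcases hq with rfl | hq
    · exact h00
    · exact (htb _ ⟨q, hq, rfl⟩).1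
    · exact hta _ ⟨p, hp, rfl⟩
    · exact (htb _ ⟨q, hq, rfl⟩).2 _ ⟨p, hp, rfl⟩

-- ===== VERDICT (by name: the statement is the Claim_ definition above) =====
theorem regions_overlap_py_spec : Claim_equal_regions_overlap_py := by
  intro r1 r2 _ ⟨h1, h2⟩
  obtain ⟨p1, t1⟩ := r1
  · exact absurd rfl h1
  obtain ⟨p2, t2⟩ := r2
  · exact absurd rfl h2
  unfold Spec_regions_overlap_py regions_overlap_py regions_overlap_py_alt pyGetBbox
  simp only [List.map_cons, PySem.List.min?_id_cons, PySem.List.max?_id_cons,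
    altSeparated_eq]
  split_ifs with hcond <;> symm <;>
    simp only [gt_iff_lt, Bool.or_eq_true, decide_eq_true_eq, not_or, not_lt,
      Bool.not_eq_eq_eq_not, Bool.not_false, Bool.not_true, Bool.or_eq_false_iff,
      decide_eq_false_iff_not] at hcond ⊢ <;> omega
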